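-- pv_equiv track=rewrite | github.com/d3x068/compilerpython | ParserLanguage.py | convert_Sentence_to_Separate
-- ===== SOURCE A (Python) =====
-- def convert_Sentence_to_Separate(TabSentence):
-- 	sprt_kword = ['class', 'def','for', 'from', 'if', 'import', 'while', 'with']
--
-- 	TabIdxToken = []
-- 	TabToken = []
-- 	TabResult = []
-- 	for i,sentence in enumerate(TabSentence):
-- 		if sentence in sprt_kword:
-- 			TabIdxToken += [i]
-- 	TabIdxToken += [len(TabSentence)]
-- 	if 0 in TabIdxToken == False:
-- 		TabIdxToken = [0] + TabIdxToken
-- 	for i in range(len(TabIdxToken)-1):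
-- 		for j in range(TabIdxToken[i], TabIdxToken[i+1]):
-- 			TabToken += TabSentence[j].split()
-- 		TabResult += [TabToken]
-- 		TabToken = []
--
-- 	return TabResult
-- ===== SOURCE B (Python) =====
-- def convert_Sentence_to_Separate(TabSentence):
--     sprt_kword = ['class', 'def', 'for', 'from', 'if', 'import', 'while', 'with']
--     result = []
--     current = None
--     for tok in TabSentence:
--         if tok in sprt_kword:
--             if current is not None:
--                 result.append(current)
--             current = []
--         if current is not None:
--             current += tok.split()
--     if current is not None:
--         result.append(current)
--     return result
-- ===== Notes on version B (the rewrite author's own statement) =====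
-- stated objective: simpler
-- what changed: Replaced A's two-pass scheme (collect keyword indices, then re-index the list over index ranges with nested loops) by a single streaming pass that keeps a running group, gated by None until the first keyword.
import Mathlib
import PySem

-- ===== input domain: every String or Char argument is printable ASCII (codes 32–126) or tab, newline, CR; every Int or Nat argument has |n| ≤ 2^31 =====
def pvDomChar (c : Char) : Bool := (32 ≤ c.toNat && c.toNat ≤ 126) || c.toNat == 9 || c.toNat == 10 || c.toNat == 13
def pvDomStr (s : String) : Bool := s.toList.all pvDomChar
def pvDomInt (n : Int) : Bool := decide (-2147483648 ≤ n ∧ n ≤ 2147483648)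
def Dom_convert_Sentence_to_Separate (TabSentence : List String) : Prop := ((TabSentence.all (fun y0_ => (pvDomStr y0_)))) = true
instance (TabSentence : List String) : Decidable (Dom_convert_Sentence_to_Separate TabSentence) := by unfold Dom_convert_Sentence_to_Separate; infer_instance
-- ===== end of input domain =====

-- B replaces A's two-pass index-collection scheme (collect keyword indices, then re-index
-- the list over index ranges) by a single streaming pass with a running group; same values.

-- ===== PORT A =====
def convert_Sentence_to_Separate (TabSentence : List String) : List (List String) :=
  let sprt_kword : List String := ["class", "def", "for", "from", "if", "import", "while", "with"]
  let TabIdxToken : List Int :=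
    (PySem.List.enumerate TabSentence).foldl
      (fun acc p => if sprt_kword.contains p.2 then acc ++ [p.1] else acc) []
  let TabIdxToken := TabIdxToken ++ [(TabSentence.length : Int)]
  -- Python's `0 in TabIdxToken == False` is the chained comparison
  -- `(0 in TabIdxToken) and (TabIdxToken == False)`; a list never equals False, so the branch is dead
  let TabIdxToken := if TabIdxToken.contains 0 && false then 0 :: TabIdxToken else TabIdxToken
  let st :=
    (PySem.List.pyRange 0 ((TabIdxToken.length : Int) - 1) 1).foldl
      (fun (st : List (List String) × List String) i =>
        let TabToken :=
          (PySem.List.pyRange (PySem.List.pyGetD TabIdxToken i 0) (PySem.List.pyGetD TabIdxToken (i + 1) 0) 1).foldl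
            (fun t j => t ++ PySem.Str.split₀ (PySem.List.pyGetD TabSentence j "")) st.2
        (st.1 ++ [TabToken], ([] : List String)))
      (([] : List (List String)), ([] : List String))
  st.1

-- ===== PORT B =====
def convert_Sentence_to_Separate_alt (TabSentence : List String) : List (List String) :=
  let sprt_kword : List String := ["class", "def", "for", "from", "if", "import", "while", "with"]
  let st := TabSentence.foldl
    (fun (st : List (List String) × Option (List String)) tok =>
      let st := if sprt_kword.contains tok then
          ((match st.2 with | some c => st.1 ++ [c] | none => st.1), some ([] : List String))
        else st
      match st.2 with
      | some c => (st.1, some (c ++ PySem.Str.split₀ tok))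
      | none => (st.1, none))
    (([] : List (List String)), (none : Option (List String)))
  match st.2 with | some c => st.1 ++ [c] | none => st.1

-- ===== PRECONDITION & SPEC =====
def Spec_convert_Sentence_to_Separate (TabSentence : List String) (out : List (List String)) : Prop := out = convert_Sentence_to_Separate_alt TabSentence
instance (TabSentence : List String) (out : List (List String)) : Decidable (Spec_convert_Sentence_to_Separate TabSentence out) := by unfold Spec_convert_Sentence_to_Separate; infer_instance

-- ===== CLAIM (what is proved, stated in full; the proofs are below) =====
def Claim_equal_convert_Sentence_to_Separate : Prop := ∀ (TabSentence : List String), Dom_convert_Sentence_to_Separate TabSentence → Spec_convert_Sentence_to_Separate TabSentence (convert_Sentence_to_Separate TabSentence)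

-- ===== LEMMAS AND PROOFS =====

-- proof-side vocabulary
def pvKW : List String := ["class", "def", "for", "from", "if", "import", "while", "with"]

def pvSpl (s : String) : List String := PySem.Str.split₀ s

-- keyword positions of the list, ascending
def pvP : List String → List Nat
  | [] => []
  | t :: ts => (if pvKW.contains t then [0] else []) ++ (pvP ts).map (· + 1)

def pvIdxFull (xs : List String) : List Nat := pvP xs ++ [xs.length]

def pvSeg (xs : List String) (p : Nat × Nat) : List String :=
  ((xs.drop p.1).take (p.2 - p.1)).flatMap pvSpl

def pvGroupsIdx (xs : List String) (idx : List Nat) : List (List String) :=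
  (idx.zip idx.tail).map (pvSeg xs)

def pvSpecGo : List String → List String → List (List String)
  | [], c => [c]
  | t :: ts, c => if pvKW.contains t then c :: pvSpecGo ts (pvSpl t) else pvSpecGo ts (c ++ pvSpl t)

def pvSpec : List String → List (List String)
  | [] => []
  | t :: ts => if pvKW.contains t then pvSpecGo ts (pvSpl t) else pvSpec ts

def pvIdxFirst : List String → Nat
  | [] => 0
  | t :: ts => if pvKW.contains t then 0 else pvIdxFirst ts + 1

theorem pvSpl_empty : PySem.Str.split₀ "" = [] := by decide

-- enumerate-fold computes the keyword positions
theorem pvEnumFold (xs : List String) : ∀ (k : Int) (acc : List Int),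
    (PySem.List.enumerate xs k).foldl
      (fun acc p => if pvKW.contains p.2 then acc ++ [p.1] else acc) acc
    = acc ++ (pvP xs).map (fun (n : Nat) => k + (n : Int)) := by
  induction xs with
  | nil => intro k acc; simp [PySem.List.enumerate, pvP]
  | cons t ts ih =>
    intro k acc
    rw [PySem.List.enumerate_cons, List.foldl_cons]
    have hmm : ((pvP ts).map (· + 1)).map (fun (n : Nat) => k + (n : Int))
        = (pvP ts).map (fun (n : Nat) => k + 1 + (n : Int)) := by
      rw [List.map_map]
      apply List.map_congr_left
      intro n _
      simp only [Function.comp_apply]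
      push_cast
      ring
    by_cases h : t ∈ pvKW
    · rw [if_pos (by simpa using h), ih]
      rw [show pvP (t :: ts) = 0 :: (pvP ts).map (· + 1) from by simp [pvP, h]]
      rw [List.map_cons, hmm]
      simp
    · rw [if_neg (by simpa using h), ih]
      rw [show pvP (t :: ts) = (pvP ts).map (· + 1) from by simp [pvP, h]]
      rw [hmm]

-- inner loop: range fold over the sentence list is a segment
theorem pvInnerFold (xs : List String) (b : Nat) : ∀ (n a : Nat) (t : List String), n = b - a →
    (PySem.List.pyRange (a : Int) (b : Int) 1).foldl
      (fun t j => t ++ PySem.Str.split₀ (PySem.List.pyGetD xs j "")) t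
    = t ++ pvSeg xs (a, b) := by
  intro n
  induction n with
  | zero =>
    intro a t h
    have hba : (b : Int) ≤ (a : Int) := by exact_mod_cast Nat.le_of_sub_eq_zero h.symm
    rw [PySem.List.pyRange_one_eq_nil hba]
    simp [pvSeg, Nat.sub_eq_zero_of_le (by omega : b ≤ a)]
  | succ m ih =>
    intro a t h
    have hab : (a : Int) < (b : Int) := by exact_mod_cast (by omega : a < b)
    rw [PySem.List.pyRange_one_cons hab]
    simp only [List.foldl_cons]
    have hcast : (a : Int) + 1 = ((a + 1 : Nat) : Int) := by push_cast; ring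
    rw [hcast, ih (a + 1) _ (by omega), PySem.List.pyGetD_natCast]
    by_cases hlt : a < xs.length
    · have hdrop : xs.drop a = xs[a] :: xs.drop (a + 1) := List.drop_eq_getElem_cons hlt
      have hgetD : xs.getD a "" = xs[a] := by
        simp [List.getD_eq_getElem?_getD, List.getElem?_eq_getElem hlt]
      have hsub : b - a = (b - (a + 1)) + 1 := by omega
      have hseg : pvSeg xs (a, b) = pvSpl xs[a] ++ pvSeg xs (a + 1, b) := by
        simp only [pvSeg, hdrop, hsub, List.take_succ_cons, List.flatMap_cons]
      rw [hseg, hgetD]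
      rw [List.append_assoc]
      rfl
    · have hd1 : xs.drop a = [] := List.drop_eq_nil_of_le (by omega)
      have hd2 : xs.drop (a + 1) = [] := List.drop_eq_nil_of_le (by omega)
      have hgetD : xs.getD a "" = "" := by
        simp [List.getD_eq_getElem?_getD, List.getElem?_eq_none (by omega : xs.length ≤ a)]
      rw [hgetD, pvSpl_empty]
      simp [pvSeg, hd1, hd2]

-- the outer range fold reads exactly the adjacent pairs of the index list
theorem pvPairsEq (idx : List Int) :
    (PySem.List.pyRange 0 ((idx.length : Int) - 1) 1).map
      (fun i => (PySem.List.pyGetD idx i 0, PySem.List.pyGetD idx (i + 1) 0))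
    = idx.zip idx.tail := by
  apply List.ext_getElem
  · simp only [List.length_map, PySem.List.length_pyRange_one, List.length_zip, List.length_tail]
    omega
  · intro k h1 h2
    have hk : k < idx.length - 1 := by
      simp [PySem.List.length_pyRange_one] at h1; omega
    have hr : (PySem.List.pyRange 0 ((idx.length : Int) - 1) 1)[k]'(by simpa using h1) = (k : Int) := by
      rw [PySem.List.getElem_pyRange_one]; ring
    simp only [List.getElem_map, hr]
    have h1' : (k : Int) + 1 = ((k + 1 : Nat) : Int) := by push_cast; ring
    rw [h1', PySem.List.pyGetD_natCast, PySem.List.pyGetD_natCast, List.getElem_zip]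
    have hka : k < idx.length := by omega
    have hkb : k + 1 < idx.length := by omega
    have e1 : idx.getD k 0 = idx[k] := by
      simp [List.getD_eq_getElem?_getD, List.getElem?_eq_getElem hka]
    have e2 : idx.getD (k + 1) 0 = idx.tail[k]'(by simpa [List.length_tail] using hk) := by
      simp [List.getD_eq_getElem?_getD, List.getElem?_eq_getElem hkb, List.getElem_tail]
    rw [e1, e2]

-- the group/reset accumulator is a map over the pair list
theorem pvFoldReset (h : Int × Int → List String → List String) :
    ∀ (l : List (Int × Int)) (res : List (List String)),
    (l.foldl (fun st p => (st.1 ++ [h p st.2], ([] : List String))) (res, [])).1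
    = res ++ l.map (fun p => h p []) := by
  intro l
  induction l with
  | nil => intro res; simp
  | cons p l ih => intro res; simp [ih]

theorem pvIdxCast (xs : List String) :
    (pvP xs).map (fun (n : Nat) => (n : Int)) ++ [(xs.length : Int)]
    = (pvIdxFull xs).map (fun (n : Nat) => (n : Int)) := by
  simp [pvIdxFull]

theorem pvZipMap {α β : Type} (f : α → β) (l : List α) :
    (l.map f).zip ((l.map f).tail) = (l.zip l.tail).map (fun p => (f p.1, f p.2)) := by
  cases l with
  | nil => simp
  | cons x xs =>
    simp only [List.map_cons, List.tail_cons]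
    have hz : (List.map f (x :: xs)).zip (List.map f xs)
        = ((x :: xs).zip xs).map (Prod.map f f) := List.zip_map
    rw [List.map_cons] at hz
    rw [hz]
    apply List.map_congr_left
    intro p _
    cases p
    rfl

-- the outer loop, rephrased over the adjacent index pairs
theorem pvOuter (xs : List String) (idx : List Int) :
    ((PySem.List.pyRange 0 ((idx.length : Int) - 1) 1).foldl
      (fun (st : List (List String) × List String) i =>
        (st.1 ++ [(PySem.List.pyRange (PySem.List.pyGetD idx i 0) (PySem.List.pyGetD idx (i + 1) 0) 1).foldl
            (fun t j => t ++ PySem.Str.split₀ (PySem.List.pyGetD xs j "")) st.2], ([] : List String)))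
      (([] : List (List String)), ([] : List String))).1
    = (idx.zip idx.tail).map (fun p => (PySem.List.pyRange p.1 p.2 1).foldl
        (fun t j => t ++ PySem.Str.split₀ (PySem.List.pyGetD xs j "")) []) := by
  have h1 : (PySem.List.pyRange 0 ((idx.length : Int) - 1) 1).foldl
      (fun (st : List (List String) × List String) i =>
        (st.1 ++ [(PySem.List.pyRange (PySem.List.pyGetD idx i 0) (PySem.List.pyGetD idx (i + 1) 0) 1).foldl
            (fun t j => t ++ PySem.Str.split₀ (PySem.List.pyGetD xs j "")) st.2], ([] : List String)))
      (([] : List (List String)), ([] : List String))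
      = ((PySem.List.pyRange 0 ((idx.length : Int) - 1) 1).map
          (fun i => (PySem.List.pyGetD idx i 0, PySem.List.pyGetD idx (i + 1) 0))).foldl
        (fun (st : List (List String) × List String) (p : Int × Int) =>
          (st.1 ++ [(PySem.List.pyRange p.1 p.2 1).foldl
            (fun t j => t ++ PySem.Str.split₀ (PySem.List.pyGetD xs j "")) st.2], ([] : List String)))
        (([] : List (List String)), ([] : List String)) := by
    rw [List.foldl_map]
  rw [h1, pvPairsEq idx]
  have h2 : ((idx.zip idx.tail).foldl
        (fun (st : List (List String) × List String) (p : Int × Int) =>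
          (st.1 ++ [(PySem.List.pyRange p.1 p.2 1).foldl
            (fun t j => t ++ PySem.Str.split₀ (PySem.List.pyGetD xs j "")) st.2], ([] : List String)))
        (([] : List (List String)), ([] : List String))).1
      = [] ++ (idx.zip idx.tail).map (fun p => (PySem.List.pyRange p.1 p.2 1).foldl
          (fun t j => t ++ PySem.Str.split₀ (PySem.List.pyGetD xs j "")) []) :=
    pvFoldReset (fun (p : Int × Int) (t : List String) =>
      (PySem.List.pyRange p.1 p.2 1).foldl
        (fun t j => t ++ PySem.Str.split₀ (PySem.List.pyGetD xs j "")) t) (idx.zip idx.tail) []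
  rw [h2, List.nil_append]

-- A's port, with the local lets substituted (definitional unfolding only)
theorem pvA_unfold (xs : List String) :
    convert_Sentence_to_Separate xs =
      (let idx : List Int :=
        ((PySem.List.enumerate xs 0).foldl
          (fun acc p => if pvKW.contains p.2 then acc ++ [p.1] else acc) []) ++ [(xs.length : Int)]
      let idx2 := if idx.contains 0 && false then 0 :: idx else idx
      ((PySem.List.pyRange 0 ((idx2.length : Int) - 1) 1).foldl
        (fun (st : List (List String) × List String) i =>
          (st.1 ++ [(PySem.List.pyRange (PySem.List.pyGetD idx2 i 0) (PySem.List.pyGetD idx2 (i + 1) 0) 1).foldl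
            (fun t j => t ++ PySem.Str.split₀ (PySem.List.pyGetD xs j "")) st.2], ([] : List String)))
        (([] : List (List String)), ([] : List String))).1) := rfl

-- A's port computes the index-based groups
theorem pvA_eq_groups (xs : List String) :
    convert_Sentence_to_Separate xs = pvGroupsIdx xs (pvIdxFull xs) := by
  rw [pvA_unfold]
  simp only [Bool.and_false, Bool.false_eq_true, if_false]
  rw [pvEnumFold xs 0, List.nil_append]
  rw [show (pvP xs).map (fun (n : Nat) => (0 : Int) + (n : Int))
        = (pvP xs).map (fun (n : Nat) => (n : Int)) from
      List.map_congr_left (fun n _ => by ring)]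
  rw [pvIdxCast]
  refine Eq.trans (pvOuter xs ((pvIdxFull xs).map (fun (n : Nat) => (n : Int)))) ?_
  rw [pvZipMap (fun (n : Nat) => (n : Int)) (pvIdxFull xs), List.map_map]
  unfold pvGroupsIdx
  apply List.map_congr_left
  intro p _
  obtain ⟨a, b⟩ := p
  simpa [Function.comp] using pvInnerFold xs b (b - a) a [] rfl

-- index-shift: all indices +1 against a cons is the same groups
theorem pvSegShift (t : String) (ts : List String) (a b : Nat) :
    pvSeg (t :: ts) (a + 1, b + 1) = pvSeg ts (a, b) := by
  simp [pvSeg, Nat.succ_sub_succ]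

theorem pvShift (t : String) (ts : List String) (idx : List Nat) :
    pvGroupsIdx (t :: ts) (idx.map (· + 1)) = pvGroupsIdx ts idx := by
  unfold pvGroupsIdx
  rw [pvZipMap, List.map_map]
  apply List.map_congr_left
  intro p _
  simpa using pvSegShift t ts p.1 p.2

theorem pvIdxFull_cons (t : String) (ts : List String) :
    pvIdxFull (t :: ts) = (if pvKW.contains t then [0] else []) ++ (pvIdxFull ts).map (· + 1) := by
  simp [pvIdxFull, pvP, List.map_append]

theorem pvIdxFull_head (ts : List String) : ∃ r, pvIdxFull ts = pvIdxFirst ts :: r := by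
  induction ts with
  | nil => exact ⟨[], rfl⟩
  | cons t ts ih =>
    by_cases h : t ∈ pvKW
    · exact ⟨(pvIdxFull ts).map (· + 1), by simp [pvIdxFull_cons, pvIdxFirst, h]⟩
    · obtain ⟨r, hr⟩ := ih
      exact ⟨r.map (· + 1), by simp [pvIdxFull_cons, pvIdxFirst, h, hr]⟩

theorem pvSpecGo_char (ts : List String) : ∀ c, pvSpecGo ts c
    = (c ++ (ts.take (pvIdxFirst ts)).flatMap pvSpl) :: pvSpec (ts.drop (pvIdxFirst ts)) := by
  induction ts with
  | nil => intro c; simp [pvSpecGo, pvIdxFirst, pvSpec]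
  | cons t ts ih =>
    intro c
    by_cases h : t ∈ pvKW
    · simp [pvSpecGo, pvSpec, pvIdxFirst, h]
    · rw [show pvSpecGo (t :: ts) c = pvSpecGo ts (c ++ pvSpl t) from by simp [pvSpecGo, h]]
      rw [ih]
      rw [show pvIdxFirst (t :: ts) = pvIdxFirst ts + 1 from by simp [pvIdxFirst, h]]
      simp [List.append_assoc]

theorem pvSpec_skip (ts : List String) : pvSpec ts = pvSpec (ts.drop (pvIdxFirst ts)) := by
  induction ts with
  | nil => rfl
  | cons t ts ih =>
    by_cases h : t ∈ pvKW
    · simp [pvIdxFirst, h]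
    · simp [pvSpec, pvIdxFirst, h, ih]

theorem pvGroups_eq_spec (xs : List String) : pvGroupsIdx xs (pvIdxFull xs) = pvSpec xs := by
  induction xs with
  | nil => simp [pvGroupsIdx, pvIdxFull, pvP, pvSpec]
  | cons t ts ih =>
    by_cases h : t ∈ pvKW
    · obtain ⟨r, hr⟩ := pvIdxFull_head ts
      rw [pvIdxFull_cons]
      rw [show (if pvKW.contains t then [0] else []) = [0] from by simp [h]]
      rw [hr, List.map_cons, List.singleton_append]
      have hz : pvGroupsIdx (t :: ts) (0 :: (pvIdxFirst ts + 1) :: r.map (· + 1))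
          = pvSeg (t :: ts) (0, pvIdxFirst ts + 1)
            :: pvGroupsIdx (t :: ts) ((pvIdxFirst ts + 1) :: r.map (· + 1)) := by
        simp [pvGroupsIdx]
      rw [hz]
      have h2 : pvGroupsIdx (t :: ts) ((pvIdxFirst ts + 1) :: r.map (· + 1))
          = pvSpec (ts.drop (pvIdxFirst ts)) := by
        rw [show (pvIdxFirst ts + 1) :: r.map (· + 1) = (pvIdxFirst ts :: r).map (· + 1) from by simp]
        rw [← hr, pvShift, ih]
        exact pvSpec_skip ts
      rw [h2]
      have h3 : pvSeg (t :: ts) (0, pvIdxFirst ts + 1)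
          = pvSpl t ++ (ts.take (pvIdxFirst ts)).flatMap pvSpl := by
        simp [pvSeg]
      rw [h3]
      rw [show pvSpec (t :: ts) = pvSpecGo ts (pvSpl t) from by simp [pvSpec, h]]
      rw [pvSpecGo_char]
    · rw [pvIdxFull_cons]
      rw [show (if pvKW.contains t then [0] else []) = [] from by simp [h], List.nil_append,
        pvShift, ih]
      simp [pvSpec, h]

-- B-side: the streaming step and flush
def pvBStep (st : List (List String) × Option (List String)) (tok : String) :
    List (List String) × Option (List String) :=
  let st := if pvKW.contains tok then
      ((match st.2 with | some c => st.1 ++ [c] | none => st.1), some ([] : List String))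
    else st
  match st.2 with
  | some c => (st.1, some (c ++ PySem.Str.split₀ tok))
  | none => (st.1, none)

def pvFlush (st : List (List String) × Option (List String)) : List (List String) :=
  match st.2 with | some c => st.1 ++ [c] | none => st.1

theorem pvBsome (ts : List String) : ∀ (res : List (List String)) (c : List String),
    pvFlush (ts.foldl pvBStep (res, some c)) = res ++ pvSpecGo ts c := by
  induction ts with
  | nil => intro res c; simp [pvFlush, pvSpecGo]
  | cons t ts ih =>
    intro res c
    by_cases h : t ∈ pvKW
    · have hstep : pvBStep (res, some c) t = (res ++ [c], some (PySem.Str.split₀ t)) := by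
        simp [pvBStep, h]
      rw [List.foldl_cons, hstep, ih]
      rw [show pvSpecGo (t :: ts) c = c :: pvSpecGo ts (pvSpl t) from by simp [pvSpecGo, h]]
      simp [pvSpl]
    · have hstep : pvBStep (res, some c) t = (res, some (c ++ PySem.Str.split₀ t)) := by
        simp [pvBStep, h]
      rw [List.foldl_cons, hstep, ih]
      rw [show pvSpecGo (t :: ts) c = pvSpecGo ts (c ++ pvSpl t) from by simp [pvSpecGo, h]]
      simp [pvSpl]

theorem pvBnone (ts : List String) : ∀ (res : List (List String)),
    pvFlush (ts.foldl pvBStep (res, none)) = res ++ pvSpec ts := by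
  induction ts with
  | nil => intro res; simp [pvFlush, pvSpec]
  | cons t ts ih =>
    intro res
    by_cases h : t ∈ pvKW
    · have hstep : pvBStep (res, none) t = (res, some (PySem.Str.split₀ t)) := by
        simp [pvBStep, h]
      rw [List.foldl_cons, hstep, pvBsome]
      rw [show pvSpec (t :: ts) = pvSpecGo ts (pvSpl t) from by simp [pvSpec, h]]
      simp [pvSpl]
    · have hstep : pvBStep (res, none) t = (res, none) := by
        simp [pvBStep, h]
      rw [List.foldl_cons, hstep, ih]
      simp [pvSpec, h]

theorem pvB_eq_spec (xs : List String) : convert_Sentence_to_Separate_alt xs = pvSpec xs := by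
  show pvFlush (xs.foldl pvBStep ([], none)) = pvSpec xs
  rw [pvBnone]
  simp

-- ===== VERDICT (by name: the statement is the Claim_ definition above) =====
theorem convert_Sentence_to_Separate_spec : Claim_equal_convert_Sentence_to_Separate := by
  intro xs _
  unfold Spec_convert_Sentence_to_Separate
  rw [pvA_eq_groups, pvGroups_eq_spec, pvB_eq_spec]
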